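-- pv_equiv track=rewrite | github.com/Blooverh/Python_Algorithms | Recursion/C-4-18.py | whichHasMore
-- ===== SOURCE A (Python) =====
-- def whichHasMore(str):
--     vowels=['a','e','i','o','u']
--
--     if len(str) == 0:
--         return 0
--     if str[0] not in vowels:
--         return 1 + whichHasMore(str[1:])
--     else:
--         return whichHasMore(str[1:])
-- ===== SOURCE B (Python) =====
-- def whichHasMore(str):
--     vowels = ['a', 'e', 'i', 'o', 'u']
--     count = 0
--     for ch in str:
--         if ch not in vowels:
--             count += 1
--     return count
-- ===== Notes on version B (the rewrite author's own statement) =====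
-- stated objective: simpler
-- what changed: Replaces the tail recursion on str[1:] (which copies the suffix each step) with a single explicit loop over the characters accumulating a counter.
import Mathlib
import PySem

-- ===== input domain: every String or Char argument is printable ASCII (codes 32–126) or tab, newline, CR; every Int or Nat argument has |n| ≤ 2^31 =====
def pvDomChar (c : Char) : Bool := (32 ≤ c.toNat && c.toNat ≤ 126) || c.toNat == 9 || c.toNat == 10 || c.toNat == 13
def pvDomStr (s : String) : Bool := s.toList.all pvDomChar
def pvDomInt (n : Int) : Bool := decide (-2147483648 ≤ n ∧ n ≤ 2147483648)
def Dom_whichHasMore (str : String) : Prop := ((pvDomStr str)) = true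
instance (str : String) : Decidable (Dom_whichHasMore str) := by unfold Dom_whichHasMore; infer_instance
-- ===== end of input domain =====

-- B replaces A's tail recursion on str[1:] with a single loop accumulating a counter (simpler; avoids per-step slicing).


-- ===== PORT A =====
def pvVowels : List Char := ['a', 'e', 'i', 'o', 'u']

-- recursion on the character list, mirroring A's recursion on str[1:]
def whichHasMoreList : List Char → Int
  | [] => 0
  | c :: rest => if c ∉ pvVowels then 1 + whichHasMoreList rest else whichHasMoreList rest

def whichHasMore (str : String) : Int := whichHasMoreList str.toList

-- ===== PORT B =====
def whichHasMore_alt (str : String) : Int :=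
  str.toList.foldl (fun count ch => if ch ∉ pvVowels then count + 1 else count) 0

-- ===== PRECONDITION & SPEC =====
def Spec_whichHasMore (str : String) (out : Int) : Prop := out = whichHasMore_alt str
instance (str : String) (out : Int) : Decidable (Spec_whichHasMore str out) := by unfold Spec_whichHasMore; infer_instance

-- ===== CLAIM (what is proved, stated in full; the proofs are below) =====
def Claim_equal_whichHasMore : Prop := ∀ (str : String), Dom_whichHasMore str → Spec_whichHasMore str (whichHasMore str)

-- ===== LEMMAS AND PROOFS =====

-- ===== VERDICT (by name: the statement is the Claim_ definition above) =====
theorem whichHasMoreList_foldl (l : List Char) (acc : Int) :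
    l.foldl (fun count ch => if ch ∉ pvVowels then count + 1 else count) acc
      = acc + whichHasMoreList l := by
  induction l generalizing acc with
  | nil => simp [whichHasMoreList]
  | cons c rest ih =>
    simp only [List.foldl, whichHasMoreList]
    split_ifs
    · exact ih acc
    · rw [ih (acc+1)]; ring

theorem whichHasMore_spec : Claim_equal_whichHasMore := by
  intro str _
  show whichHasMore str = whichHasMore_alt str
  rw [whichHasMore, whichHasMore_alt, whichHasMoreList_foldl, zero_add]
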